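-- pv_equiv track=rewrite | github.com/sajjadGG/euphony-PS | property_signatures.py | input_longer_than_output
-- ===== SOURCE A (Python) =====
-- AllTrue = -1
--
-- Mixed = 0
--
-- AllFalse = 1
--
-- def input_longer_than_output(input_output, key):
--     is_true_present = False
--     is_false_present = False
--     for in_out in input_output:
--         program_input = in_out[key]
--         output = in_out['out']
--         if len(program_input) > len(output):
--             is_true_present = True
--         else:
--             is_false_present = True
--
--     if is_true_present and is_false_present:
--         return Mixed
--     elif is_true_present:
--         return AllTrue
--     else:
--         return AllFalse
-- ===== SOURCE B (Python) =====
-- AllTrue = -1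
--
-- Mixed = 0
--
-- AllFalse = 1
--
-- def input_longer_than_output(input_output, key):
--     def longer(io):
--         return len(io[key]) > len(io['out'])
--     if input_output and all(longer(io) for io in input_output):
--         return AllTrue
--     if any(longer(io) for io in input_output):
--         return Mixed
--     return AllFalse
-- ===== Notes on version B (the rewrite author's own statement) =====
-- stated objective: idiomatic
-- what changed: Replaces A's single pass threading two mutable presence flags with staged short-circuiting passes: first decide AllTrue via all(), then Mixed via any(), defaulting to AllFalse; no per-element state is maintained.
import Mathlib
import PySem

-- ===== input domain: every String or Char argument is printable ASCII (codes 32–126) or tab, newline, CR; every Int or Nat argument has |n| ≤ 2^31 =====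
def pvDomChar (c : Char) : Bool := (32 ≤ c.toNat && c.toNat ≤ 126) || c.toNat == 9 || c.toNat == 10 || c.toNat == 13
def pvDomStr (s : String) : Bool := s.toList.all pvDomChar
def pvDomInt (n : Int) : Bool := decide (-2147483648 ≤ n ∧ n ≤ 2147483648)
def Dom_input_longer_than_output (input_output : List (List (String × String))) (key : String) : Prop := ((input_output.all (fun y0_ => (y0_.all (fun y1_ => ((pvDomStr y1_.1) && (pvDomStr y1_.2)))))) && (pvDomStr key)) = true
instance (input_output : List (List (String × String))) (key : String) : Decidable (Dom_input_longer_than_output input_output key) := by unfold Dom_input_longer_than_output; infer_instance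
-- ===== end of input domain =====

-- B replaces A's single pass with two mutable presence flags by staged short-circuiting
-- passes (all(), then any()) with no per-element state; same cost, more idiomatic.

-- ===== PORT A =====
def input_longer_than_output (input_output : List (List (String × String))) (key : String) : Int :=
  let st := input_output.foldl (fun (st : Bool × Bool) in_out =>
    let program_input := ((PySem.Dict.mk in_out).get? key).getD ""
    let output := ((PySem.Dict.mk in_out).get? "out").getD ""
    if PySem.Str.len program_input > PySem.Str.len output then (true, st.2) else (st.1, true))
    (false, false)
  if st.1 && st.2 then 0 else if st.1 then -1 else 1

-- ===== PORT B =====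
def pvLonger (io : List (String × String)) (key : String) : Bool :=
  decide (PySem.Str.len (((PySem.Dict.mk io).get? key).getD "") >
          PySem.Str.len (((PySem.Dict.mk io).get? "out").getD ""))

def input_longer_than_output_alt (input_output : List (List (String × String))) (key : String) : Int :=
  if (!input_output.isEmpty) && input_output.all (fun io => pvLonger io key) then -1
  else if input_output.any (fun io => pvLonger io key) then 0
  else 1

-- ===== PRECONDITION & SPEC =====
-- Pre_ excludes exactly the inputs on which Python A raises KeyError: some element dict
-- missing `key` or the 'out' key.
def Pre_input_longer_than_output (input_output : List (List (String × String))) (key : String) : Prop :=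
  ∀ io ∈ input_output, (PySem.Dict.mk io).contains key = true ∧ (PySem.Dict.mk io).contains "out" = true
instance (input_output : List (List (String × String))) (key : String) : Decidable (Pre_input_longer_than_output input_output key) := by unfold Pre_input_longer_than_output; infer_instance

def pvWitness_input_longer_than_output : (List (List (String × String))) × String :=
  ([[("x", "ab"), ("out", "c")]], "x")

def Spec_input_longer_than_output (input_output : List (List (String × String))) (key : String) (out : Int) : Prop := out = input_longer_than_output_alt input_output key
instance (input_output : List (List (String × String))) (key : String) (out : Int) : Decidable (Spec_input_longer_than_output input_output key out) := by unfold Spec_input_longer_than_output; infer_instance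

-- ===== CLAIM (what is proved, stated in full; the proofs are below) =====
def Claim_equal_input_longer_than_output : Prop := ∀ (input_output : List (List (String × String))) (key : String), Dom_input_longer_than_output input_output key → Pre_input_longer_than_output input_output key → Spec_input_longer_than_output input_output key (input_longer_than_output input_output key)

-- ===== LEMMAS AND PROOFS =====

-- A's loop computes, from any start state, "was some outcome true / was some outcome false".
theorem pvFoldA {α : Type} (P : α → Prop) [DecidablePred P] (l : List α) (t f : Bool) :
    l.foldl (fun (st : Bool × Bool) x => if P x then (true, st.2) else (st.1, true)) (t, f)
      = (t || l.any (fun x => decide (P x)), f || l.any (fun x => !decide (P x))) := by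
  induction l generalizing t f with
  | nil => simp
  | cons x xs ih =>
    by_cases h : P x <;> simp [h, ih]

theorem pvAllAny {α : Type} (l : List α) (p : α → Bool) :
    l.all p = !(l.any fun x => !p x) := by
  induction l with
  | nil => rfl
  | cons a t ih => cases h : p a <;> simp [h, ih]

theorem pvEmptyOfNone {α : Type} (l : List α) (p : α → Bool)
    (hT : l.any p = false) (hF : l.any (fun x => !p x) = false) : l = [] := by
  cases l with
  | nil => rfl
  | cons a t =>
    simp only [List.any_cons, Bool.or_eq_false_iff] at hT hF
    cases h : p a
    · simp [h] at hF
    · simp [h] at hT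

-- both three-way classifications agree, for any boolean outcome predicate
theorem pvClassify {α : Type} (l : List α) (p : α → Bool) :
    (if (l.any p) && (l.any fun x => !p x) then (0 : Int) else if l.any p then -1 else 1)
      = if (!l.isEmpty) && l.all p then -1 else if l.any p then 0 else 1 := by
  cases hT : l.any p <;> cases hF : l.any (fun x => !p x)
  · have : l = [] := pvEmptyOfNone l p hT hF
    subst this; simp
  · simp [hT, pvAllAny, hF]
  · have hne : l.isEmpty = false := by
      cases l with
      | nil => simp at hT
      | cons a t => rfl
    simp [hT, hF, hne, pvAllAny]
  · simp [hT, hF, pvAllAny]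

theorem input_longer_than_output_eq (input_output : List (List (String × String))) (key : String) :
    input_longer_than_output input_output key = input_longer_than_output_alt input_output key := by
  have hA := pvFoldA (fun in_out : List (String × String) =>
    PySem.Str.len (((PySem.Dict.mk in_out).get? key).getD "") >
      PySem.Str.len (((PySem.Dict.mk in_out).get? "out").getD "")) input_output false false
  unfold input_longer_than_output input_longer_than_output_alt
  simp only [hA, Bool.false_or]
  exact pvClassify input_output (fun io => pvLonger io key)

-- ===== VERDICT (by name: the statement is the Claim_ definition above) =====
theorem input_longer_than_output_spec : Claim_equal_input_longer_than_output := by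
  intro io key _ _
  unfold Spec_input_longer_than_output
  exact input_longer_than_output_eq io key
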